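-- pv_equiv track=rewrite | github.com/manu14357/ML | enhanced-backend/app/services/ai_service_advanced.py | _truncate_individual_node_prompt
-- ===== SOURCE A (Python) =====
-- def _truncate_individual_node_prompt(prompt: str, node_id: str, max_chars: int = 30000) -> str:
--     """
--     Truncate an individual node prompt while preserving the most important parts.
--     """
--     if len(prompt) <= max_chars:
--         return prompt
--
--     lines = prompt.split('\n')
--
--     # Find important sections
--     header_end = 0
--     analysis_start = len(lines)
--
--     for i, line in enumerate(lines):
--         if "**NODE ID:" in line.upper() or "NODE ANALYSIS:" in line.upper():
--             header_end = min(i + 10, len(lines))  # Keep 10 lines after header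
--         if "ANALYSIS REQUIREMENTS" in line.upper() or "REQUIREMENTS" in line.upper():
--             analysis_start = i
--             break
--
--     # Keep header and requirements, truncate middle data
--     header_lines = lines[:header_end]
--     footer_lines = lines[analysis_start:] if analysis_start < len(lines) else []
--
--     truncated_lines = header_lines + [
--         "",
--         "...[DATA CONTENT TRUNCATED TO PREVENT TOKEN OVERFLOW]...",
--         f"[Node {node_id} data summarized for analysis efficiency]",
--         ""
--     ] + footer_lines
--
--     truncated_prompt = '\n'.join(truncated_lines)
--
--     # If still too long, do simple truncation
--     if len(truncated_prompt) > max_chars: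
--         truncated_prompt = truncated_prompt[:max_chars] + "\n\n[PROMPT TRUNCATED DUE TO LENGTH]"
--
--     return truncated_prompt
-- ===== SOURCE B (Python) =====
-- def _truncate_individual_node_prompt(prompt: str, node_id: str, max_chars: int = 30000) -> str:
--     if len(prompt) <= max_chars:
--         return prompt
--
--     lines = prompt.split('\n')
--     n = len(lines)
--
--     def is_req(line):
--         u = line.upper()
--         return "ANALYSIS REQUIREMENTS" in u or "REQUIREMENTS" in u
--
--     def is_hdr(line):
--         u = line.upper()
--         return "**NODE ID:" in u or "NODE ANALYSIS:" in u
--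
--     # indices of interesting lines, gathered by comprehension
--     req_idxs = [i for i, line in enumerate(lines) if is_req(line)]
--     analysis_start = req_idxs[0] if req_idxs else n
--
--     hdr_idxs = [i for i, line in enumerate(lines[:analysis_start + 1]) if is_hdr(line)]
--     header_end = min(hdr_idxs[-1] + 10, n) if hdr_idxs else 0
--
--     # assemble the result directly as string pieces
--     truncated = (
--         ('\n'.join(lines[:header_end]) + '\n' if header_end > 0 else '')
--         + "\n...[DATA CONTENT TRUNCATED TO PREVENT TOKEN OVERFLOW]...\n"
--         + f"[Node {node_id} data summarized for analysis efficiency]\n"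
--         + ('\n' + '\n'.join(lines[analysis_start:]) if analysis_start < n else '')
--     )
--
--     if len(truncated) > max_chars:
--         truncated = truncated[:max_chars] + "\n\n[PROMPT TRUNCATED DUE TO LENGTH]"
--
--     return truncated
-- ===== Notes on version B (the rewrite author's own statement) =====
-- stated objective: alternative
-- what changed: A's single stateful break-on-hit scan plus list-of-lines join is replaced by comprehension-built index lists (first requirements index, last header index before it) and direct piecewise string assembly of header/middle/footer with explicit separators instead of joining one combined list.
import Mathlib
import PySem

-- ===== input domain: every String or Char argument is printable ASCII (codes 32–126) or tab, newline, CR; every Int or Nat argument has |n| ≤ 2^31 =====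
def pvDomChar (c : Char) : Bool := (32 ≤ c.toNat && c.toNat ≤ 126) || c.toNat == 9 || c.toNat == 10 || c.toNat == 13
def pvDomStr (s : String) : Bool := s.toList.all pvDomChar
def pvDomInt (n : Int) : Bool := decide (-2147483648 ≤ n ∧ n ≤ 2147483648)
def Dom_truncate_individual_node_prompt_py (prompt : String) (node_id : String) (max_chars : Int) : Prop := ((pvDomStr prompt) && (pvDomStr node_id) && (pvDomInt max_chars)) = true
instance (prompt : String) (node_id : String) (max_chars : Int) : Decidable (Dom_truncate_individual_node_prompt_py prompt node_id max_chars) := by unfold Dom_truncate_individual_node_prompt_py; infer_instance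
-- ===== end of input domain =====

-- B replaces A's single stateful break-on-hit scan and list join by comprehension-gathered
-- marker index lists (first/last element) and direct piecewise string assembly; objective:
-- alternative decomposition, same cost.

-- ===== PORT A =====
-- A's single for-loop: carries the running header_end, breaks at the first requirements line.
def pvHdrA (l : String) : Bool :=
  PySem.Str.isIn "**NODE ID:" (PySem.Str.upper l) || PySem.Str.isIn "NODE ANALYSIS:" (PySem.Str.upper l)

def pvReqA (l : String) : Bool :=
  PySem.Str.isIn "ANALYSIS REQUIREMENTS" (PySem.Str.upper l) || PySem.Str.isIn "REQUIREMENTS" (PySem.Str.upper l)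

def pvLoopA : List String → Nat → Nat → Nat → Nat × Nat
  | [], _i, he, n => (he, n)
  | l :: rest, i, he, n =>
    let he' := if pvHdrA l then min (i + 10) n else he
    if pvReqA l then (he', i) else pvLoopA rest (i + 1) he' n

def truncate_individual_node_prompt_py (prompt : String) (node_id : String) (max_chars : Int) : String :=
  if PySem.Str.len prompt ≤ max_chars then prompt
  else
    let lines := (PySem.Str.split? prompt "\n").getD []
    let n := lines.length
    let p := pvLoopA lines 0 0 n
    let header_end := p.1
    let analysis_start := p.2
    let header_lines := lines.take header_end
    let footer_lines := if analysis_start < n then lines.drop analysis_start else []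
    let truncated_lines := header_lines ++
      ["", "...[DATA CONTENT TRUNCATED TO PREVENT TOKEN OVERFLOW]...",
       "[Node " ++ node_id ++ " data summarized for analysis efficiency]", ""] ++ footer_lines
    let tp := PySem.Str.join "\n" truncated_lines
    if PySem.Str.len tp > max_chars
    then PySem.Str.slice tp none (some max_chars) ++ "\n\n[PROMPT TRUNCATED DUE TO LENGTH]"
    else tp

-- ===== PORT B =====
def pvIsHdr (l : String) : Bool :=
  PySem.Str.isIn "**NODE ID:" (PySem.Str.upper l) || PySem.Str.isIn "NODE ANALYSIS:" (PySem.Str.upper l)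

def pvIsReq (l : String) : Bool :=
  PySem.Str.isIn "ANALYSIS REQUIREMENTS" (PySem.Str.upper l) || PySem.Str.isIn "REQUIREMENTS" (PySem.Str.upper l)

-- [i for i, line in enumerate(ls) if p(line)]  (i is the enumeration counter)
def pvIdxs (p : String → Bool) : List String → Nat → List Nat
  | [], _i => []
  | l :: rest, i => if p l then i :: pvIdxs p rest (i + 1) else pvIdxs p rest (i + 1)

def truncate_individual_node_prompt_py_alt (prompt : String) (node_id : String) (max_chars : Int) : String :=
  if PySem.Str.len prompt ≤ max_chars then prompt
  else
    let lines := (PySem.Str.split? prompt "\n").getD []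
    let n := lines.length
    -- req_idxs[0] if req_idxs else n
    let req_idxs := pvIdxs pvIsReq lines 0
    let analysis_start := req_idxs.head?.getD n
    -- min(hdr_idxs[-1] + 10, n) if hdr_idxs else 0
    let hdr_idxs := pvIdxs pvIsHdr (lines.take (analysis_start + 1)) 0
    let header_end := match hdr_idxs.getLast? with
      | some i => min (i + 10) n
      | none => 0
    -- assemble the result directly as string pieces
    let truncated :=
      (if header_end > 0 then PySem.Str.join "\n" (lines.take header_end) ++ "\n" else "")
      ++ "\n...[DATA CONTENT TRUNCATED TO PREVENT TOKEN OVERFLOW]...\n"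
      ++ ("[Node " ++ node_id ++ " data summarized for analysis efficiency]\n")
      ++ (if analysis_start < n then "\n" ++ PySem.Str.join "\n" (lines.drop analysis_start) else "")
    if PySem.Str.len truncated > max_chars
    then PySem.Str.slice truncated none (some max_chars) ++ "\n\n[PROMPT TRUNCATED DUE TO LENGTH]"
    else truncated

-- ===== PRECONDITION & SPEC =====
def Spec_truncate_individual_node_prompt_py (prompt : String) (node_id : String) (max_chars : Int) (out : String) : Prop := out = truncate_individual_node_prompt_py_alt prompt node_id max_chars
instance (prompt : String) (node_id : String) (max_chars : Int) (out : String) : Decidable (Spec_truncate_individual_node_prompt_py prompt node_id max_chars out) := by unfold Spec_truncate_individual_node_prompt_py; infer_instance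

-- ===== CLAIM =====
def Claim_equal_truncate_individual_node_prompt_py : Prop := ∀ (prompt : String) (node_id : String) (max_chars : Int), Dom_truncate_individual_node_prompt_py prompt node_id max_chars → Spec_truncate_individual_node_prompt_py prompt node_id max_chars (truncate_individual_node_prompt_py prompt node_id max_chars)

-- ===== LEMMAS AND PROOFS =====

-- proof-side: first requirements index at/after i, default n
def pvFirstReq : List String → Nat → Nat → Nat
  | [], _i, n => n
  | l :: rest, i, n => if pvIsReq l then i else pvFirstReq rest (i + 1) n

-- proof-side: enumerate(…) starting at index i
def pvEnum : Nat → List String → List (Nat × String)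
  | _i, [] => []
  | i, l :: rest => (i, l) :: pvEnum (i + 1) rest

-- proof-side: A's header_end accumulator replayed over a reversed enumeration
def pvLastHdrAux : List (Nat × String) → Nat → Nat → Nat
  | [], he, _n => he
  | (i, l) :: rest, he, n => if pvIsHdr l then min (i + 10) n else pvLastHdrAux rest he n

theorem lastHdrAux_append (xs : List (Nat × String)) (i : Nat) (l : String) (he n : Nat) :
    pvLastHdrAux (xs ++ [(i, l)]) he n
      = pvLastHdrAux xs (if pvIsHdr l then min (i + 10) n else he) n := by
  induction xs with
  | nil => rfl
  | cons p rest ih => cases p with | mk j m => simp [pvLastHdrAux, ih]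

theorem firstReq_ge (ls : List String) (i n : Nat) :
    i ≤ pvFirstReq ls i n ∨ pvFirstReq ls i n = n := by
  induction ls generalizing i with
  | nil => exact Or.inr rfl
  | cons l rest ih =>
    simp only [pvFirstReq]
    split
    · exact Or.inl (le_refl i)
    · rcases ih (i + 1) with h' | h'
      · exact Or.inl (by omega)
      · exact Or.inr h'

theorem loopA_eq (ls : List String) (i he n : Nat) (h : i + ls.length = n) :
    pvLoopA ls i he n
      = (pvLastHdrAux (pvEnum i (ls.take (pvFirstReq ls i n - i + 1))).reverse he n,
         pvFirstReq ls i n) := by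
  induction ls generalizing i he with
  | nil => simp [pvLoopA, pvFirstReq, pvEnum, pvLastHdrAux]
  | cons l rest ih =>
    simp only [pvLoopA, pvFirstReq]
    by_cases hr : pvIsReq l
    · have : pvReqA l = pvIsReq l := rfl
      simp [this, hr, pvEnum, pvLastHdrAux, pvHdrA, pvIsHdr]
    · have hra : pvReqA l = pvIsReq l := rfl
      have hlen : (i + 1) + rest.length = n := by rw [List.length_cons] at h; omega
      have hge : i + 1 ≤ pvFirstReq rest (i + 1) n := by
        rcases firstReq_ge rest (i + 1) n with h' | h' <;> omega
      rw [Bool.not_eq_true] at hr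
      set m := pvFirstReq rest (i + 1) n with hm
      have htake : (l :: rest).take (m - i + 1) = l :: rest.take (m - (i + 1) + 1) := by
        have h1 : m - i + 1 = (m - (i + 1) + 1) + 1 := by omega
        simp [h1]
      rw [hra, hr]
      simp only [Bool.false_eq_true, if_false]
      rw [ih (i + 1) _ hlen, htake]
      simp only [pvEnum, List.reverse_cons]
      rw [lastHdrAux_append]
      have hh : pvHdrA l = pvIsHdr l := rfl
      simp [hh, ← hm]

-- bridge (a): the loop's analysis_start is the head of the comprehension's index list
theorem firstReq_eq_idxs (ls : List String) (i n : Nat) :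
    pvFirstReq ls i n = (pvIdxs pvIsReq ls i).head?.getD n := by
  induction ls generalizing i with
  | nil => rfl
  | cons l rest ih =>
    by_cases hr : pvIsReq l
    · simp [pvFirstReq, pvIdxs, hr]
    · simp [pvFirstReq, pvIdxs, hr, ih]

-- bridge (b): the loop's header_end is the last of the comprehension's index list
theorem lastHdr_eq_idxs (pref : List String) (k he n : Nat) :
    pvLastHdrAux (pvEnum k pref).reverse he n
      = (match (pvIdxs pvIsHdr pref k).getLast? with
         | some i => min (i + 10) n
         | none => he) := by
  induction pref generalizing k he with
  | nil => rfl
  | cons l rest ih =>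
    simp only [pvEnum, List.reverse_cons]
    rw [lastHdrAux_append, ih]
    by_cases hh : pvIsHdr l
    · simp only [pvIdxs, hh, if_true]
      cases ht : (pvIdxs pvIsHdr rest (k + 1)) with
      | nil => simp
      | cons a t =>
        have hcc : (k :: a :: t).getLast? = (a :: t).getLast? := by
          simp [List.getLast?_cons_cons]
        rw [hcc]
        cases hg : (a :: t).getLast? with
        | none => simp [List.getLast?_eq_none_iff] at hg
        | some j => simp
    · simp [pvIdxs, hh]

-- join (left split): sep.join(H ++ B) for nonempty B
theorem chars_join_append_left (sep : List Char) (H B : List (List Char)) (hB : B ≠ []) :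
    PySem.Chars.join sep (H ++ B)
      = (if H = [] then [] else PySem.Chars.join sep H ++ sep) ++ PySem.Chars.join sep B := by
  induction H with
  | nil => simp
  | cons h H' ih =>
    have hne : H' ++ B ≠ [] := by
      cases B with
      | nil => exact absurd rfl hB
      | cons b bs => simp
    cases hq : H' ++ B with
    | nil => exact absurd hq hne
    | cons q rest =>
      have h1 : PySem.Chars.join sep ((h :: H') ++ B) = h ++ sep ++ PySem.Chars.join sep (H' ++ B) := by
        simp only [List.cons_append, hq, PySem.Chars.join_cons_cons]
      rw [h1, ih]
      cases H' with
      | nil => simp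
      | cons h2 H'' =>
        simp only [if_neg (by simp : ¬ (h2 :: H'' = [])), if_neg (by simp : ¬ (h :: h2 :: H'' = []))]
        rw [PySem.Chars.join_cons_cons]
        simp [List.append_assoc]

theorem str_join_append_left (sep : String) (H B : List String) (hB : B ≠ []) :
    PySem.Str.join sep (H ++ B)
      = (if H = [] then "" else PySem.Str.join sep H ++ sep) ++ PySem.Str.join sep B := by
  unfold PySem.Str.join
  rw [List.map_append, chars_join_append_left _ _ _ (by simpa using hB)]
  by_cases hH : H = []
  · simp [hH]
  · rw [if_neg (by simpa using hH), if_neg hH]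
    simp [String.append_assoc]

theorem str_join_append_right (sep : String) (A F : List String) (hA : A ≠ []) :
    PySem.Str.join sep (A ++ F)
      = PySem.Str.join sep A ++ (if F = [] then "" else sep ++ PySem.Str.join sep F) := by
  by_cases hF : F = []
  · simp [hF]
  · rw [str_join_append_left sep A F hF, if_neg hA, if_neg hF]
    simp [String.append_assoc]

theorem join_mid (m1 m2 : String) :
    PySem.Str.join "\n" ["", m1, m2, ""] = "\n" ++ m1 ++ "\n" ++ m2 ++ "\n" := by
  unfold PySem.Str.join
  simp only [List.map_cons, List.map_nil]
  rw [PySem.Chars.join_cons_cons, PySem.Chars.join_cons_cons, PySem.Chars.join_cons_cons,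
      PySem.Chars.join_singleton]
  have h : ∀ (a b : String), a ++ b = String.ofList (a.toList ++ b.toList) := by
    intro a b; simp
  rw [h ("\n" ++ m1 ++ "\n" ++ m2), h ("\n" ++ m1 ++ "\n"), h ("\n" ++ m1), h ("\n":String) m1]
  simp

theorem assemble_eq (H F : List String) (m1 m2 : String) :
    PySem.Str.join "\n" (H ++ ["", m1, m2, ""] ++ F)
      = (if H = [] then "" else PySem.Str.join "\n" H ++ "\n")
        ++ ("\n" ++ m1 ++ "\n" ++ m2 ++ "\n")
        ++ (if F = [] then "" else "\n" ++ PySem.Str.join "\n" F) := by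
  rw [List.append_assoc, str_join_append_left "\n" H (["", m1, m2, ""] ++ F) (by simp),
      str_join_append_right "\n" ["", m1, m2, ""] F (by simp), join_mid]
  simp [String.append_assoc]

theorem ports_agree (prompt node_id : String) (max_chars : Int) :
    truncate_individual_node_prompt_py prompt node_id max_chars
      = truncate_individual_node_prompt_py_alt prompt node_id max_chars := by
  unfold truncate_individual_node_prompt_py truncate_individual_node_prompt_py_alt
  dsimp only
  by_cases hle : PySem.Str.len prompt ≤ max_chars
  · rw [if_pos hle, if_pos hle]
  · rw [if_neg hle, if_neg hle]
    set L := (PySem.Str.split? prompt "\n").getD [] with hL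
    set n := L.length with hn
    have hloop := loopA_eq L 0 0 n (by omega)
    simp only [Nat.sub_zero] at hloop
    rw [hloop]
    dsimp only
    rw [firstReq_eq_idxs, lastHdr_eq_idxs]
    set asv := (pvIdxs pvIsReq L 0).head?.getD n with has
    set hev := (match (pvIdxs pvIsHdr (L.take (asv + 1)) 0).getLast? with
                | some i => min (i + 10) n
                | none => 0) with hhe
    have hhen : hev ≤ n := by
      rw [hhe]; cases (pvIdxs pvIsHdr (L.take (asv + 1)) 0).getLast? <;> simp
    -- header list empty iff hev = 0
    have hHiff : (L.take hev = []) ↔ ¬ hev > 0 := by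
      constructor
      · intro h
        rcases List.take_eq_nil_iff.mp h with h0 | h0
        · omega
        · have : n = 0 := by rw [hn, h0]; rfl
          omega
      · intro h
        have : hev = 0 := by omega
        simp [this]
    -- footer list empty iff ¬ asv < n
    have hFdef : (if asv < n then L.drop asv else []) = L.drop asv ∨ ¬ asv < n := by
      by_cases h : asv < n
      · exact Or.inl (by simp [h])
      · exact Or.inr h
    have key : PySem.Str.join "\n"
        (L.take hev ++
          ["", "...[DATA CONTENT TRUNCATED TO PREVENT TOKEN OVERFLOW]...",
           "[Node " ++ node_id ++ " data summarized for analysis efficiency]", ""] ++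
          (if asv < n then L.drop asv else []))
        = (if hev > 0 then PySem.Str.join "\n" (L.take hev) ++ "\n" else "")
          ++ "\n...[DATA CONTENT TRUNCATED TO PREVENT TOKEN OVERFLOW]...\n"
          ++ ("[Node " ++ node_id ++ " data summarized for analysis efficiency]\n")
          ++ (if asv < n then "\n" ++ PySem.Str.join "\n" (L.drop asv) else "") := by
      rw [assemble_eq]
      have hm : ("\n" ++ "...[DATA CONTENT TRUNCATED TO PREVENT TOKEN OVERFLOW]..." ++ "\n"
                  ++ ("[Node " ++ node_id ++ " data summarized for analysis efficiency]") ++ "\n")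
              = "\n...[DATA CONTENT TRUNCATED TO PREVENT TOKEN OVERFLOW]...\n"
                ++ ("[Node " ++ node_id ++ " data summarized for analysis efficiency]\n") := by
        simp [String.append_assoc]
      rw [hm]
      have hH : (if L.take hev = [] then "" else PySem.Str.join "\n" (L.take hev) ++ "\n")
              = (if hev > 0 then PySem.Str.join "\n" (L.take hev) ++ "\n" else "") := by
        by_cases h : hev > 0
        · rw [if_neg (fun hc => (hHiff.mp hc) h), if_pos h]
        · rw [if_pos (hHiff.mpr h), if_neg h]
      have hF : (if (if asv < n then L.drop asv else []) = [] then ""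
                  else "\n" ++ PySem.Str.join "\n" (if asv < n then L.drop asv else []))
              = (if asv < n then "\n" ++ PySem.Str.join "\n" (L.drop asv) else "") := by
        by_cases h : asv < n
        · have hne : L.drop asv ≠ [] := by
            intro hc
            have := List.drop_eq_nil_iff.mp hc
            omega
          simp [h, hne]
        · simp [h]
      rw [hH, hF]
      simp [String.append_assoc]
    rw [key]

-- ===== VERDICT =====
theorem truncate_individual_node_prompt_py_spec : Claim_equal_truncate_individual_node_prompt_py := by
  intro prompt node_id max_chars _hd
  exact ports_agree prompt node_id max_chars
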